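-- pv_equiv track=rewrite | github.com/anush-23/Python_Course | Homework/homework_14.04.py | longest_time
-- ===== SOURCE A (Python) =====
-- def longest_time(hours, minutes, seconds):
--
--     """Returns the longest duration of given number of hours, minutes and seconds"""
--
--     hour_to_second = hours * 3600
--     minute_to_second = minutes * 60
--
--     dict = {
--         hour_to_second: hours,
--         minute_to_second: minutes,
--         seconds: seconds
--     }
--
--     comparison = max(dict.keys())
--
--     for item in dict.keys():
--         return  dict[comparison]
-- ===== SOURCE B (Python) =====
-- def longest_time(hours, minutes, seconds):
--     """Returns the longest duration of given number of hours, minutes and seconds"""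
--     h = hours * 3600
--     m = minutes * 60
--     if seconds >= m and seconds >= h:
--         return seconds
--     elif m >= h:
--         return minutes
--     else:
--         return hours
-- ===== Notes on version B (the rewrite author's own statement) =====
-- stated objective: simpler
-- what changed: Replaces the dict keyed by second-counts plus max(dict.keys()) plus a loop-that-returns-immediately with a direct three-way comparison chain ordered so that the last-inserted value wins ties, matching the dict-overwrite tie-break.
import Mathlib
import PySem

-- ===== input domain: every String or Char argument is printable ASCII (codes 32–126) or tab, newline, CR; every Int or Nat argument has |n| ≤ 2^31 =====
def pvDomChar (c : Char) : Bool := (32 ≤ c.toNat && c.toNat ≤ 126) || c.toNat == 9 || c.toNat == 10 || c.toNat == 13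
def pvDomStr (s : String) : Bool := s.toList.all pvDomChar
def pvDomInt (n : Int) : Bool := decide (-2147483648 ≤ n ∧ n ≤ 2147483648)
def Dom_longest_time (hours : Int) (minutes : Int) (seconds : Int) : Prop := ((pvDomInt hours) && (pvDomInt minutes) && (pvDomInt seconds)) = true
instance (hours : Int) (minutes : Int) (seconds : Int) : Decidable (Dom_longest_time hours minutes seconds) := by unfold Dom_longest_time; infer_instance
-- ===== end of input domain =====

-- B replaces A's dict + max(dict.keys()) table with a direct comparison chain (simpler; same last-wins tie-break).

-- ===== PORT A =====
def longest_time (hours : Int) (minutes : Int) (seconds : Int) : Int :=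
  let hour_to_second := hours * 3600
  let minute_to_second := minutes * 60
  let d : PySem.Dict Int Int :=
    (((PySem.Dict.empty).insert hour_to_second hours).insert minute_to_second minutes).insert seconds seconds
  -- for item in dict.keys(): return dict[comparison] — returns on the first iteration; the keys are
  -- nonempty, so max(dict.keys()) and dict[comparison] never raise (the 'none' guards are unreachable)
  match PySem.List.max? d.keys (fun x => x) with
  | some comparison => (d.get? comparison).getD 0
  | none => 0

-- ===== PORT B =====
def longest_time_alt (hours : Int) (minutes : Int) (seconds : Int) : Int :=
  let h := hours * 3600
  let m := minutes * 60
  if seconds ≥ m ∧ seconds ≥ h then seconds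
  else if m ≥ h then minutes
  else hours

-- ===== PRECONDITION & SPEC =====
def Spec_longest_time (hours : Int) (minutes : Int) (seconds : Int) (out : Int) : Prop := out = longest_time_alt hours minutes seconds
instance (hours : Int) (minutes : Int) (seconds : Int) (out : Int) : Decidable (Spec_longest_time hours minutes seconds out) := by unfold Spec_longest_time; infer_instance

-- ===== CLAIM (what is proved, stated in full; the proofs are below) =====
def Claim_equal_longest_time : Prop := ∀ (hours : Int) (minutes : Int) (seconds : Int), Dom_longest_time hours minutes seconds → Spec_longest_time hours minutes seconds (longest_time hours minutes seconds)

-- ===== LEMMAS AND PROOFS =====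

-- Core lemma: A's dict-and-max computation, abstracted over the three keys H M S and the three
-- stored values a b c, equals B's comparison chain (last-inserted value wins on equal keys).
theorem pv_dictmax (H M S a b c : Int) :
    (let d : PySem.Dict Int Int := (((PySem.Dict.empty).insert H a).insert M b).insert S c
     match PySem.List.max? d.keys (fun x => x) with
     | some k => (d.get? k).getD 0
     | none => 0)
    = (if S ≥ M ∧ S ≥ H then c else if M ≥ H then b else a) := by
  by_cases e1 : M = H <;> by_cases e2 : S = H <;> by_cases e3 : S = M <;>
    simp [PySem.Dict.insert, PySem.Dict.empty, PySem.Dict.keys, PySem.Dict.get?, PySem.List.max?, e1, e2, e3] <;>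
    (repeat (first | omega | (split_ifs <;> simp_all)))

-- ===== VERDICT (by name: the statement is the Claim_ definition above) =====
theorem longest_time_spec : Claim_equal_longest_time := by
  intro hours minutes seconds _
  exact pv_dictmax (hours * 3600) (minutes * 60) seconds hours minutes seconds
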